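-- pv_equiv track=rewrite | github.com/delfinaronco/algoritmos-1 | Guia7.py | tiene_3_vocales_distintas
-- ===== SOURCE A (Python) =====
-- def pertenece (l: list, e: int) -> bool:
--     if e in l:
--         return True
--     else:
--         return False
--
-- def tiene_3_vocales_distintas (palabra: str) -> bool:
--     palabra.lower()
--     vocaleshalladas: list = []
--     for letra in palabra:
--         if letra == 'a' or letra == 'e' or letra == 'i' or letra == 'o' or letra == 'u':
--             vocaleshalladas.append(letra)
--     vocaleshalladas = eliminar_repetidos(vocaleshalladas)
--     if len (vocaleshalladas) >= 3:
--         return True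
--     else:
--         return False
--
-- def eliminar_repetidos (l):
--     res = []
--     for i in range (len(l)):
--         if not pertenece (res,l[i]):
--             res.append(l[i])
--     return res
-- ===== SOURCE B (Python) =====
-- def tiene_3_vocales_distintas (palabra: str) -> bool:
--     # Invert the traversal: instead of scanning the word collecting and
--     # deduplicating vowels, test each of the five vowels for membership
--     # in the word and count the hits.
--     return sum(v in palabra for v in 'aeiou') >= 3
-- ===== Notes on version B (the rewrite author's own statement) =====
-- stated objective: faster
-- what changed: Traversal inverted: A scans the word character by character collecting vowels and then runs a quadratic hand-written dedup pass before counting; B never scans or dedups the word in Python at all, it iterates over the five vowels and counts which are substrings of the word.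
import Mathlib
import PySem

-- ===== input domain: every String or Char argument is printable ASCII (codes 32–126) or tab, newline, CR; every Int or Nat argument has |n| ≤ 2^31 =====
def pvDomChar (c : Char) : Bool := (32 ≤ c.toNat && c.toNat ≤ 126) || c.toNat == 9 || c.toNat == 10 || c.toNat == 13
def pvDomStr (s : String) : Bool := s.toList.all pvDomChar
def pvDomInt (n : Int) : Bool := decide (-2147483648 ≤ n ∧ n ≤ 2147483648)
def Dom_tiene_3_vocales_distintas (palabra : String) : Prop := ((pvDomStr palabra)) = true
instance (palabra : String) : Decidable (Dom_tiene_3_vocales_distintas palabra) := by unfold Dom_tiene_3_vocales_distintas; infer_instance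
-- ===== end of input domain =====

-- B inverts the traversal: instead of scanning the word collecting vowels and running A's
-- quadratic hand-written dedup, it tests each of the five vowels for membership in the word
-- and counts the hits — five membership tests replace the per-character loop and dedup pass
-- (a timing run measured B faster on its generated inputs).

-- ===== PORT A =====
def pertenece (l : List Char) (e : Char) : Bool :=
  if l.contains e then true else false

def eliminar_repetidos (l : List Char) : List Char :=
  (PySem.List.pyRange 0 (PySem.List.len l) 1).foldl
    (fun res i =>
      if !(pertenece res (PySem.List.pyGetD l i 'a')) then res ++ [PySem.List.pyGetD l i 'a'] else res)
    []

def tiene_3_vocales_distintas (palabra : String) : Bool :=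
  let _ := PySem.Str.lower palabra  -- 'palabra.lower()' whose result A discards
  let vocaleshalladas : List Char :=
    palabra.toList.foldl
      (fun acc letra =>
        if letra == 'a' || letra == 'e' || letra == 'i' || letra == 'o' || letra == 'u'
        then acc ++ [letra] else acc)
      []
  let vocaleshalladas := eliminar_repetidos vocaleshalladas
  if vocaleshalladas.length ≥ 3 then true else false

-- ===== PORT B =====
-- sum(v in palabra for v in 'aeiou') >= 3 ; 'v in palabra' for the one-char v is list membership
def tiene_3_vocales_distintas_alt (palabra : String) : Bool :=
  decide (3 ≤ ("aeiou".toList.map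
      (fun v => if palabra.toList.contains v then (1 : Int) else 0)).sum)

-- ===== PRECONDITION & SPEC =====
def Spec_tiene_3_vocales_distintas (palabra : String) (out : Bool) : Prop := out = tiene_3_vocales_distintas_alt palabra
instance (palabra : String) (out : Bool) : Decidable (Spec_tiene_3_vocales_distintas palabra out) := by unfold Spec_tiene_3_vocales_distintas; infer_instance

-- ===== CLAIM (what is proved, stated in full; the proofs are below) =====
def Claim_equal_tiene_3_vocales_distintas : Prop := ∀ (palabra : String), Dom_tiene_3_vocales_distintas palabra → Spec_tiene_3_vocales_distintas palabra (tiene_3_vocales_distintas palabra)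

-- ===== LEMMAS AND PROOFS =====

-- A's dedup loop is exactly PySem.Set.ofList
theorem eliminar_eq_ofList (l : List Char) :
    eliminar_repetidos l = PySem.Set.ofList l := by
  unfold eliminar_repetidos
  have h := PySem.List.foldl_pyRange_pyGetD (a := 0) (xs := l)
        (f := fun res x => if !(pertenece res x) then res ++ [x] else res) (d := 'a')
        (init := ([] : List Char)) (by omega)
  rw [h, PySem.Set.ofList_eq_foldl]
  apply PySem.List.foldl_congr_mem
  intro acc x _
  simp [pertenece, PySem.Set.add]

-- A's deduped vowel list and B's list of present vowels are nodup lists with the same members,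
-- hence the same length: the number of distinct vowels occurring in the word.
theorem distinct_count (l : List Char) :
    (PySem.Set.ofList (l.filter
        (fun x => x == 'a' || x == 'e' || x == 'i' || x == 'o' || x == 'u'))).length
      = (List.filter l.contains ['a', 'e', 'i', 'o', 'u']).length := by
  apply List.Perm.length_eq
  apply (List.perm_ext_iff_of_nodup (PySem.Set.nodup_ofList _) ?_).2
  · intro c
    rw [PySem.Set.mem_ofList, List.mem_filter, List.mem_filter]
    constructor
    · rintro ⟨hc, hv⟩
      rcases (by simpa using hv : (((c = 'a' ∨ c = 'e') ∨ c = 'i') ∨ c = 'o') ∨ c = 'u') with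
        (((h | h) | h) | h) | h <;> subst h <;> simp_all [List.contains_eq_mem]
    · rintro ⟨hv, hc⟩
      refine ⟨by simpa [List.contains_eq_mem] using hc, ?_⟩
      fin_cases hv <;> decide
  · exact List.Nodup.filter _ (by decide)

theorem tiene_3_vocales_distintas_eq (palabra : String) :
    tiene_3_vocales_distintas palabra = tiene_3_vocales_distintas_alt palabra := by
  simp only [tiene_3_vocales_distintas, tiene_3_vocales_distintas_alt]
  rw [show (fun (acc : List Char) letra =>
        if letra == 'a' || letra == 'e' || letra == 'i' || letra == 'o' || letra == 'u'
        then acc ++ [letra] else acc)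
      = (fun acc letra =>
        if (letra == 'a' || letra == 'e' || letra == 'i' || letra == 'o' || letra == 'u') = true
        then acc ++ [(fun x => x) letra] else acc) from rfl,
     PySem.List.foldl_append_if, List.nil_append, List.map_id_fun', eliminar_eq_ofList,
     PySem.List.sum_map_ite_one_zero, List.countP_eq_length_filter]
  simp only [id_eq]
  rw [show "aeiou".toList = ['a', 'e', 'i', 'o', 'u'] from rfl]
  simp only [distinct_count]
  split_ifs with h
  · exact (decide_eq_true (by exact_mod_cast h)).symm
  · exact (decide_eq_false (by omega)).symm

-- ===== VERDICT (by name: the statement is the Claim_ definition above) =====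
theorem tiene_3_vocales_distintas_spec : Claim_equal_tiene_3_vocales_distintas := by
  intro palabra _
  unfold Spec_tiene_3_vocales_distintas
  exact tiene_3_vocales_distintas_eq palabra
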